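-- pv_equiv track=rewrite | github.com/redis-performance/redisbench-admin | redisbench_admin/utils/remote.py | fetch_remote_id_from_config
-- ===== SOURCE A (Python) =====
-- def fetch_remote_id_from_config(
--     remote_setup_config,
-- ):
--     setup = None
--     for remote_setup_property in remote_setup_config:
--         if "setup" in remote_setup_property:
--             setup = remote_setup_property["setup"]
--     return setup
-- ===== SOURCE B (Python) =====
-- def fetch_remote_id_from_config(
--     remote_setup_config,
-- ):
--     # Early-exit scan from the end: last 'setup' wins.
--     for prop in reversed(remote_setup_config):
--         if "setup" in prop:
--             return prop["setup"]
--     return None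
-- ===== Notes on version B (the rewrite author's own statement) =====
-- stated objective: alternative
-- what changed: Replaces the full forward pass with an overwrite accumulator by an early-exit scan over the reversed list that returns the first 'setup' found from the end.
import Mathlib
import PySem

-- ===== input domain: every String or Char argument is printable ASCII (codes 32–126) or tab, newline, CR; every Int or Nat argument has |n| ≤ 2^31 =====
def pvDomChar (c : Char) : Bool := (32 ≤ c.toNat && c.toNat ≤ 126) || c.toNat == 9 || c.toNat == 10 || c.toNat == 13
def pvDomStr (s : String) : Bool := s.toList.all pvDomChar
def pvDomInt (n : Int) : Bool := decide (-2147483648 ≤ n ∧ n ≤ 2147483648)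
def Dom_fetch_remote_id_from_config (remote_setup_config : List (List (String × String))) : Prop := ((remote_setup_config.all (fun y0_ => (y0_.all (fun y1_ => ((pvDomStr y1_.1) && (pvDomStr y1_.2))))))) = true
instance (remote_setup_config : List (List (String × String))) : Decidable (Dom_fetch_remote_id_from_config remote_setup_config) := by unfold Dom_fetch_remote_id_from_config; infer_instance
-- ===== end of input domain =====

-- B replaces A's full forward pass with an overwrite accumulator by an early-exit
-- backward scan returning the first 'setup' found from the end (same result; alternative decomposition).

-- ===== PORT A =====
-- A: setup = None; for prop in cfg: if "setup" in prop: setup = prop["setup"]; return setup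
def fetch_remote_id_from_config (remote_setup_config : List (List (String × String))) : Option String :=
  remote_setup_config.foldl
    (fun setup prop =>
      match (PySem.Dict.mk prop).get? "setup" with
      | some v => some v
      | none => setup)
    none

-- ===== PORT B =====
-- B helper: early-exit scan; applied to the reversed list below.
def fetchRemoteIdScan : List (List (String × String)) → Option String
  | [] => none
  | prop :: rest =>
    match (PySem.Dict.mk prop).get? "setup" with
    | some v => some v
    | none => fetchRemoteIdScan rest

def fetch_remote_id_from_config_alt (remote_setup_config : List (List (String × String))) : Option String :=
  fetchRemoteIdScan remote_setup_config.reverse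

-- ===== PRECONDITION & SPEC =====
def Spec_fetch_remote_id_from_config (remote_setup_config : List (List (String × String))) (out : Option String) : Prop := out = fetch_remote_id_from_config_alt remote_setup_config
instance (remote_setup_config : List (List (String × String))) (out : Option String) : Decidable (Spec_fetch_remote_id_from_config remote_setup_config out) := by unfold Spec_fetch_remote_id_from_config; infer_instance

-- ===== CLAIM (what is proved, stated in full; the proofs are below) =====
def Claim_equal_fetch_remote_id_from_config : Prop := ∀ (remote_setup_config : List (List (String × String))), Dom_fetch_remote_id_from_config remote_setup_config → Spec_fetch_remote_id_from_config remote_setup_config (fetch_remote_id_from_config remote_setup_config)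

-- ===== LEMMAS AND PROOFS =====
theorem fetchRemoteIdScan_append (xs ys : List (List (String × String))) :
    fetchRemoteIdScan (xs ++ ys) =
      match fetchRemoteIdScan xs with
      | some v => some v
      | none => fetchRemoteIdScan ys := by
  induction xs with
  | nil => simp [fetchRemoteIdScan]
  | cons p rest ih =>
    simp only [List.cons_append, fetchRemoteIdScan, ih]
    cases (PySem.Dict.mk p).get? "setup" <;> rfl

theorem fold_eq_scan (l : List (List (String × String))) (acc : Option String) :
    l.foldl
      (fun setup prop =>
        match (PySem.Dict.mk prop).get? "setup" with
        | some v => some v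
        | none => setup)
      acc =
      match fetchRemoteIdScan l.reverse with
      | some v => some v
      | none => acc := by
  induction l generalizing acc with
  | nil => simp [fetchRemoteIdScan]
  | cons p rest ih =>
    simp only [List.foldl_cons, List.reverse_cons, fetchRemoteIdScan_append, ih]
    cases fetchRemoteIdScan rest.reverse <;>
      simp [fetchRemoteIdScan] <;>
      cases (PySem.Dict.mk p).get? "setup" <;> rfl

-- ===== VERDICT (by name: the statement is the Claim_ definition above) =====
theorem fetch_remote_id_from_config_spec : Claim_equal_fetch_remote_id_from_config := by
  intro cfg _
  unfold Spec_fetch_remote_id_from_config fetch_remote_id_from_config fetch_remote_id_from_config_alt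
  rw [fold_eq_scan]
  cases fetchRemoteIdScan cfg.reverse <;> rfl
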